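-- pv_equiv track=rewrite | github.com/StevenChen16/nnUNet | GuaranteedCompatibleConfig.py | get_compatible_sizes
-- ===== SOURCE A (Python) =====
-- from typing import Tuple, List, Dict
--
-- def get_compatible_sizes(max_size: int = 512) -> List[int]:
--     """Get all sizes compatible with window_size=2 and downscaling=16."""
--     # LCM of 2 and 16 is 16
--     # All multiples of 16 where final size (size/16) is even
--     compatible = []
--     size = 32  # Start from 32 (32/16=2, which is even)
--     while size <= max_size:
--         final_size = size // 16
--         if final_size % 2 == 0:  # Final size must be divisible by window_size=2
--             compatible.append(size)
--         size += 16
--     return compatible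
-- ===== SOURCE B (Python) =====
-- from typing import List
--
-- def get_compatible_sizes(max_size: int = 512) -> List[int]:
--     """Get all sizes compatible with window_size=2 and downscaling=16."""
--     # Sizes whose size//16 is even are exactly the multiples of 32.
--     return list(range(32, max_size + 1, 32))
-- ===== Notes on version B (the rewrite author's own statement) =====
-- stated objective: simpler
-- what changed: B enumerates multiples of 32 directly with range(32, max_size+1, 32) instead of A's loop over multiples of 16 with a per-step parity test on size//16.
import Mathlib
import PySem

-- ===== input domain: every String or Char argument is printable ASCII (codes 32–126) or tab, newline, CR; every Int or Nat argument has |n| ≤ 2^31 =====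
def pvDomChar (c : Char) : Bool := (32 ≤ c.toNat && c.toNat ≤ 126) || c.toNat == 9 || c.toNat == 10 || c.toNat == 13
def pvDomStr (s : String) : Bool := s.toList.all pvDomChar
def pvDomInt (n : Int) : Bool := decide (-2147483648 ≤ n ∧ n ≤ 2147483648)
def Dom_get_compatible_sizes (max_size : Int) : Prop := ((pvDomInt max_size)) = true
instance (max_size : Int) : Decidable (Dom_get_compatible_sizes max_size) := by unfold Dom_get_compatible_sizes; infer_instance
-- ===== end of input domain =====

-- B replaces A's scan of multiples of 16 (with a parity test on size//16) by directly
-- enumerating the multiples of 32 via range(32, max_size+1, 32); objective: simpler.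

-- ===== PORT A =====
-- the while loop of A: size steps by 16, appending when (size // 16) % 2 == 0
def pvLoopA (max_size size : Int) (acc : List Int) : List Int :=
  if _h : size ≤ max_size then
    let final_size := PySem.Int.floordiv size 16
    pvLoopA max_size (size + 16)
      (if PySem.Int.mod final_size 2 = 0 then acc ++ [size] else acc)
  else acc
termination_by (max_size + 1 - size).toNat
decreasing_by omega

def get_compatible_sizes (max_size : Int) : List Int :=
  pvLoopA max_size 32 []

-- ===== PORT B =====
def get_compatible_sizes_alt (max_size : Int) : List Int :=
  PySem.List.pyRange 32 (max_size + 1) 32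

-- ===== PRECONDITION & SPEC =====
def Spec_get_compatible_sizes (max_size : Int) (out : List Int) : Prop := out = get_compatible_sizes_alt max_size
instance (max_size : Int) (out : List Int) : Decidable (Spec_get_compatible_sizes max_size out) := by unfold Spec_get_compatible_sizes; infer_instance

-- ===== CLAIM (what is proved, stated in full; the proofs are below) =====
def Claim_equal_get_compatible_sizes : Prop := ∀ (max_size : Int), Dom_get_compatible_sizes max_size → Spec_get_compatible_sizes max_size (get_compatible_sizes max_size)

-- ===== LEMMAS AND PROOFS =====

lemma pyRange32_nil (a b : Int) (h : b ≤ a) : PySem.List.pyRange a b 32 = [] := by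
  rw [PySem.List.pyRange_of_pos a b (by norm_num)]
  rw [if_neg (by omega)]
  simp

lemma pyRange32_cons (a b : Int) (h : a < b) :
    PySem.List.pyRange a b 32 = a :: PySem.List.pyRange (a + 32) b 32 := by
  rw [PySem.List.pyRange_of_pos a b (by norm_num),
      PySem.List.pyRange_of_pos (a + 32) b (by norm_num)]
  rw [if_pos h]
  by_cases h2 : a + 32 < b
  · rw [if_pos h2]
    have hn : ((b - a + 32 - 1) / 32).toNat = ((b - (a + 32) + 32 - 1) / 32).toNat + 1 := by
      omega
    rw [hn, List.range_succ_eq_map]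
    simp only [List.map_cons, List.map_map]
    push_cast
    rw [add_zero]
    congr 1
    exact List.map_congr_left (fun k _ => by simp [Function.comp]; ring)
  · rw [if_neg h2]
    have hn : ((b - a + 32 - 1) / 32).toNat = 1 := by omega
    rw [hn]
    simp

lemma loopA_eq (max_size size : Int) (acc : List Int) :
    (16 : Int) ∣ size →
    pvLoopA max_size size acc =
      acc ++ PySem.List.pyRange (if (32 : Int) ∣ size then size else size + 16)
        (max_size + 1) 32 := by
  induction size, acc using pvLoopA.induct max_size with
  | case1 size acc hle fs ih =>
    intro h16
    rw [pvLoopA, dif_pos hle]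
    simp only []
    obtain ⟨t, rfl⟩ := h16
    have hfs' : PySem.Int.floordiv (16 * t) 16 = t := by
      simp only [PySem.Int.floordiv]
      rw [Int.mul_fdiv_cancel_left _ (by norm_num)]
    have hfs : fs = t := hfs'
    rw [hfs']
    rw [hfs] at ih
    by_cases h32 : (32 : Int) ∣ 16 * t
    · have hmod : PySem.Int.mod t 2 = 0 := by
        rw [PySem.Int.mod_eq_zero_iff_dvd]; omega
      rw [if_pos hmod]
      rw [dif_pos hmod] at ih
      rw [ih (by omega)]
      have h32' : ¬ (32 : Int) ∣ 16 * t + 16 := by omega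
      rw [if_neg h32', if_pos h32]
      conv_rhs => rw [pyRange32_cons (16 * t) (max_size + 1) (by omega)]
      simp only [List.append_assoc, List.singleton_append, List.append_cancel_left_eq,
        List.cons.injEq, true_and]
      congr 1
      omega
    · have hmod : ¬ PySem.Int.mod t 2 = 0 := by
        rw [PySem.Int.mod_eq_zero_iff_dvd]; omega
      rw [if_neg hmod]
      rw [dif_neg hmod] at ih
      rw [ih (by omega)]
      have h32' : (32 : Int) ∣ 16 * t + 16 := by omega
      rw [if_pos h32', if_neg h32]
  | case2 size acc hle =>
    intro h16
    rw [pvLoopA, dif_neg hle]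
    rw [pyRange32_nil _ _ (by split <;> omega)]
    simp

-- ===== VERDICT (by name: the statement is the Claim_ definition above) =====
theorem get_compatible_sizes_spec : Claim_equal_get_compatible_sizes := by
  intro max_size _
  unfold Spec_get_compatible_sizes get_compatible_sizes get_compatible_sizes_alt
  rw [loopA_eq _ _ _ (by norm_num)]
  rw [if_pos (by norm_num)]
  simp
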